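-- pv_equiv track=rewrite | github.com/minhtribk12/code-review-ai | src/code_review_agent/diff_renderer.py | render_suggestion_as_diff
-- ===== SOURCE A (Python) =====
-- _STYLE_ADDED = "bg:ansigreen fg:ansiblack"
--
-- _STYLE_REMOVED = "bg:ansired fg:ansiwhite"
--
-- _STYLE_CONTEXT = ""
--
-- _Lines = list[tuple[str, str]]
--
-- def render_suggestion_as_diff(
--     suggestion: str,
--     file_path: str | None = None,
-- ) -> _Lines:
--     """Render a suggestion string, highlighting code blocks as diffs.
--
--     Detects fenced code blocks (```...```) and renders them with
--     syntax-aware coloring. Non-code text is rendered as-is.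
--     """
--     lines: _Lines = []
--     in_code_block = False
--     code_lines: list[str] = []
--     block_count = 0
--
--     for line in suggestion.splitlines():
--         if line.strip().startswith("```"):
--             if in_code_block:
--                 # End of code block: render accumulated code
--                 block_count += 1
--                 style = _STYLE_ADDED if block_count % 2 == 0 else _STYLE_REMOVED
--                 if block_count == 1:
--                     style = _STYLE_CONTEXT
--                 for cl in code_lines:
--                     lines.append(("dim", "     "))
--                     lines.append((style, f"{cl}\n"))
--                 code_lines = []
--                 in_code_block = False
--             else:
--                 in_code_block = True
--             continue
--
--         if in_code_block:
--             code_lines.append(line)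
--         else:
--             lines.append(("", f"     {line}\n"))
--
--     # Flush any unclosed code block
--     for cl in code_lines:
--         lines.append(("dim", "     "))
--         lines.append((_STYLE_CONTEXT, f"{cl}\n"))
--
--     return lines
-- ===== SOURCE B (Python) =====
-- _STYLE_ADDED = "bg:ansigreen fg:ansiblack"
-- _STYLE_REMOVED = "bg:ansired fg:ansiwhite"
-- _STYLE_CONTEXT = ""
--
--
-- def render_suggestion_as_diff(suggestion, file_path=None):
--     """Two-pass renderer: first build structured segments, then render them."""
--     all_lines = suggestion.splitlines()
--     n = len(all_lines)
--
--     # Pass 1: segments = text lines and code blocks (body, closed?)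
--     segments = []
--     i = 0
--     while i < n:
--         line = all_lines[i]
--         if line.strip().startswith("```"):
--             body = []
--             j = i + 1
--             closed = False
--             while j < n:
--                 if all_lines[j].strip().startswith("```"):
--                     closed = True
--                     break
--                 body.append(all_lines[j])
--                 j += 1
--             segments.append(("block", body, closed))
--             i = j + 1
--         else:
--             segments.append(("text", line))
--             i += 1
--
--     # Pass 2: render segments, numbering the closed blocks
--     out = []
--     k = 0  # index among closed blocks
--     for seg in segments:
--         if seg[0] == "text":
--             out.append(("", f"     {seg[1]}\n"))
--         else:
--             _, body, closed = seg
--             if closed: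
--                 k += 1
--                 style = _STYLE_CONTEXT if k == 1 else (
--                     _STYLE_ADDED if k % 2 == 0 else _STYLE_REMOVED)
--             else:
--                 style = _STYLE_CONTEXT
--             out += [t for cl in body
--                       for t in (("dim", "     "), (style, f"{cl}\n"))]
--     return out
-- ===== Notes on version B (the rewrite author's own statement) =====
-- stated objective: alternative
-- what changed: Replaces A's single stateful loop (in_code_block flag, pending code_lines buffer, end-of-loop flush) by two separate passes: pass 1 scans the lines into a structured segment list (text lines, and code blocks tagged closed/unclosed), pass 2 renders the segments while numbering only the closed blocks.
import Mathlib
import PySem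

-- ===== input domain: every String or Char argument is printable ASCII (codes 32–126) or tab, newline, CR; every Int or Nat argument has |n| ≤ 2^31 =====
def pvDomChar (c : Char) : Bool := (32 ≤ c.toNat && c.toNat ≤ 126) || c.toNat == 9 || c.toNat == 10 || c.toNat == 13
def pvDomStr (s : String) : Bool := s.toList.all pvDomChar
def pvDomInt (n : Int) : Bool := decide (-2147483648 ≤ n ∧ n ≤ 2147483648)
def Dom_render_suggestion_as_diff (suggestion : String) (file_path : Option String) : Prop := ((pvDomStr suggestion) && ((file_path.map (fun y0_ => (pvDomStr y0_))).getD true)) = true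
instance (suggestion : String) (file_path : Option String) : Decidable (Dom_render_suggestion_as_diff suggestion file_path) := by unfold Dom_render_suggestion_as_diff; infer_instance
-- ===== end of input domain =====

-- B re-organises A's single stateful fence-toggling loop into two passes (segment
-- list, then render); same output, same cost ("alternative", not faster).

def pvStyleAdded : String := "bg:ansigreen fg:ansiblack"
def pvStyleRemoved : String := "bg:ansired fg:ansiwhite"
def pvStyleContext : String := ""

-- line.strip().startswith("```")  (used verbatim by both Pythons)
def pvFence (line : String) : Bool := PySem.Str.startswith (PySem.Str.strip line) "```"

-- ===== PORT A =====
-- loop state: (lines, in_code_block, code_lines, block_count)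
def pvStepA (st : List (String × String) × Bool × List String × Nat) (line : String) :
    List (String × String) × Bool × List String × Nat :=
  let (lines, inCode, codeLines, blockCount) := st
  if pvFence line then
    if inCode then
      let bc := blockCount + 1
      let style0 := if bc % 2 = 0 then pvStyleAdded else pvStyleRemoved
      let style := if bc = 1 then pvStyleContext else style0
      let lines' := codeLines.foldl (fun acc cl => acc ++ [("dim", "     "), (style, cl ++ "\n")]) lines
      (lines', false, [], bc)
    else
      (lines, true, codeLines, blockCount)
  else
    if inCode then
      (lines, inCode, codeLines ++ [line], blockCount)
    else
      (lines ++ [("", "     " ++ line ++ "\n")], inCode, codeLines, blockCount)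

def render_suggestion_as_diff (suggestion : String) (file_path : Option String) : List (String × String) :=
  let st := (PySem.Str.splitlines suggestion).foldl pvStepA ([], false, [], 0)
  let (lines, _, codeLines, _) := st
  -- flush any unclosed code block
  codeLines.foldl (fun acc cl => acc ++ [("dim", "     "), (pvStyleContext, cl ++ "\n")]) lines

-- ===== PORT B =====
inductive PvSeg where
  | text : String → PvSeg
  | block : List String → Bool → PvSeg
deriving DecidableEq, Repr

-- inner scan of pass 1: body up to the closing fence, closed?, remaining lines
def pvScanBlock : List String → List String × Bool × List String
  | [] => ([], false, [])
  | l :: ls =>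
    if pvFence l then ([], true, ls)
    else
      let (body, closed, rest) := pvScanBlock ls
      (l :: body, closed, rest)

theorem pvScanBlock_rest_le (ls : List String) : (pvScanBlock ls).2.2.length ≤ ls.length := by
  induction ls with
  | nil => simp [pvScanBlock]
  | cons l ls ih =>
    simp only [pvScanBlock]
    split
    · simp
    · simp only []
      exact le_trans ih (Nat.le_succ _)

-- pass 1
def pvSegments : List String → List PvSeg
  | [] => []
  | l :: ls =>
    if pvFence l then
      let s := pvScanBlock ls
      PvSeg.block s.1 s.2.1 :: pvSegments s.2.2
    else
      PvSeg.text l :: pvSegments ls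
termination_by ls => ls.length
decreasing_by
  · exact Nat.lt_succ_of_le (pvScanBlock_rest_le ls)
  · simp

-- pass 2 step: accumulator (out, closed-block index k)
def pvRenderSeg (acc : List (String × String) × Nat) (s : PvSeg) :
    List (String × String) × Nat :=
  match s with
  | PvSeg.text l => (acc.1 ++ [("", "     " ++ l ++ "\n")], acc.2)
  | PvSeg.block body closed =>
    if closed then
      let k := acc.2 + 1
      let style := if k = 1 then pvStyleContext
                   else if k % 2 = 0 then pvStyleAdded else pvStyleRemoved
      (acc.1 ++ body.flatMap (fun cl => [("dim", "     "), (style, cl ++ "\n")]), k)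
    else
      (acc.1 ++ body.flatMap (fun cl => [("dim", "     "), (pvStyleContext, cl ++ "\n")]), acc.2)

def render_suggestion_as_diff_alt (suggestion : String) (file_path : Option String) : List (String × String) :=
  ((pvSegments (PySem.Str.splitlines suggestion)).foldl pvRenderSeg ([], 0)).1

-- ===== PRECONDITION & SPEC =====
def Spec_render_suggestion_as_diff (suggestion : String) (file_path : Option String) (out : List (String × String)) : Prop := out = render_suggestion_as_diff_alt suggestion file_path
instance (suggestion : String) (file_path : Option String) (out : List (String × String)) : Decidable (Spec_render_suggestion_as_diff suggestion file_path out) := by unfold Spec_render_suggestion_as_diff; infer_instance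

-- ===== CLAIM (what is proved, stated in full; the proofs are below) =====
def Claim_equal_render_suggestion_as_diff : Prop := ∀ (suggestion : String) (file_path : Option String), Dom_render_suggestion_as_diff suggestion file_path → Spec_render_suggestion_as_diff suggestion file_path (render_suggestion_as_diff suggestion file_path)

-- ===== LEMMAS AND PROOFS =====

-- emit a block body with a given style (the shape both ports produce)
def pvEmit (acc : List (String × String)) (body : List String) (style : String) : List (String × String) :=
  acc ++ body.flatMap (fun cl => [("dim", "     "), (style, cl ++ "\n")])

def pvStyle (k : Nat) : String :=
  if k = 1 then pvStyleContext else if k % 2 = 0 then pvStyleAdded else pvStyleRemoved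

theorem pvEmit_foldl (acc : List (String × String)) (body : List String) (style : String) :
    body.foldl (fun acc cl => acc ++ [("dim", "     "), (style, cl ++ "\n")]) acc = pvEmit acc body style :=
  PySem.List.foldl_append_eq_flatMap _ _ _

theorem pvScanBlock_unclosed (ls : List String) (h : (pvScanBlock ls).2.1 = false) :
    (pvScanBlock ls).2.2 = [] := by
  induction ls with
  | nil => simp [pvScanBlock]
  | cons l ls ih =>
    simp only [pvScanBlock] at h ⊢
    split at h
    · simp at h
    · simp only [] at h ⊢
      rename_i hf
      simp only [hf]
      exact ih h

-- A's loop while inside a code block, characterised by pvScanBlock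
theorem pvInCode (ls : List String) (acc : List (String × String)) (code : List String) (c : Nat) :
    ls.foldl pvStepA (acc, true, code, c) =
      (if (pvScanBlock ls).2.1 then
        (pvScanBlock ls).2.2.foldl pvStepA
          (pvEmit acc (code ++ (pvScanBlock ls).1) (pvStyle (c + 1)), false, [], c + 1)
      else (acc, true, code ++ (pvScanBlock ls).1, c)) := by
  induction ls generalizing code with
  | nil => simp [pvScanBlock]
  | cons l ls ih =>
    by_cases hf : pvFence l
    · simp only [List.foldl_cons, pvStepA, hf, if_true, pvScanBlock]
      rw [pvEmit_foldl]
      simp [pvStyle]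
    · rw [List.foldl_cons,
        show pvStepA (acc, true, code, c) l = (acc, true, code ++ [l], c) by
          simp [pvStepA, hf],
        ih (code ++ [l])]
      simp [pvScanBlock, hf, List.append_assoc]

-- main invariant: A's loop (from a not-in-block state) + flush = B's render of the segments
theorem pvMain (ls : List String) (acc : List (String × String)) (c : Nat) :
    (let st := ls.foldl pvStepA (acc, false, [], c)
     st.2.2.1.foldl (fun a cl => a ++ [("dim", "     "), (pvStyleContext, cl ++ "\n")]) st.1)
      = ((pvSegments ls).foldl pvRenderSeg (acc, c)).1 := by
  induction ls using pvSegments.induct generalizing acc c with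
  | case1 => simp [pvSegments]
  | case2 l ls hf s ih =>
    have hs : s = pvScanBlock ls := rfl
    rw [List.foldl_cons,
      show pvStepA (acc, false, [], c) l = (acc, true, [], c) by simp [pvStepA, hf],
      pvInCode]
    simp only [pvSegments, hf, if_true, List.foldl_cons]
    by_cases hc : (pvScanBlock ls).2.1 = true
    · rw [if_pos hc]
      have h2 := ih (pvEmit acc (pvScanBlock ls).1 (pvStyle (c + 1))) (c + 1)
      simp only [hs] at h2 ⊢
      simp only [List.nil_append] at *
      rw [h2]
      simp only [pvRenderSeg, hc, if_pos]
      rfl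
    · rw [if_neg hc]
      have hb : (pvScanBlock ls).2.1 = false := by simpa using hc
      have hrest : (pvScanBlock ls).2.2 = [] := pvScanBlock_unclosed ls hb
      simp only [hrest, pvSegments, List.foldl_nil]
      rw [pvEmit_foldl]
      simp [pvRenderSeg, hb, pvEmit]
  | case3 l ls hf ih =>
    rw [List.foldl_cons,
      show pvStepA (acc, false, [], c) l = (acc ++ [("", "     " ++ l ++ "\n")], false, [], c) by
        simp [pvStepA, hf]]
    simp only [pvSegments, hf, Bool.false_eq_true, if_false, List.foldl_cons, pvRenderSeg]
    exact ih _ _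

-- ===== VERDICT (by name: the statement is the Claim_ definition above) =====
theorem render_suggestion_as_diff_spec : Claim_equal_render_suggestion_as_diff := by
  intro suggestion _file_path _
  unfold Spec_render_suggestion_as_diff render_suggestion_as_diff render_suggestion_as_diff_alt
  have h := pvMain (PySem.Str.splitlines suggestion) [] 0
  simp only [] at h
  rcases hst : (PySem.Str.splitlines suggestion).foldl pvStepA ([], false, [], 0) with
    ⟨lines, inCode, codeLines, bc⟩
  rw [hst] at h
  simpa using h
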